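-- pv_equiv track=rewrite | github.com/rishuramani/RC | marketing-bot/src/integrations/twitter_api.py | _parse_thread_text
-- ===== SOURCE A (Python) =====
-- def _parse_thread_text(thread_text: str) -> list[str]:
--     """Parse numbered thread text into individual tweets."""
--     tweets = []
--     current = []
--
--     for line in thread_text.strip().split("\n"):
--         stripped = line.strip()
--         if stripped and stripped[0].isdigit() and "/" in stripped[:4]:
--             if current:
--                 tweets.append("\n".join(current).strip())
--             current = [stripped]
--         elif stripped:
--             current.append(stripped)
--
--     if current:
--         tweets.append("\n".join(current).strip())
--
--     return tweets if tweets else [thread_text.strip()]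
-- ===== SOURCE B (Python) =====
-- def _parse_thread_text(thread_text: str) -> list[str]:
--     """Parse numbered thread text into individual tweets (segment-scan version)."""
--     lines = [l.strip() for l in thread_text.strip().split("\n") if l.strip()]
--
--     def is_header(s):
--         return s[0].isdigit() and "/" in s[:4]
--
--     groups = []
--     i = 0
--     while i < len(lines):
--         j = i + 1
--         while j < len(lines) and not is_header(lines[j]):
--             j += 1
--         groups.append(lines[i:j])
--         i = j
--
--     tweets = ["\n".join(g).strip() for g in groups]
--     return tweets if tweets else [thread_text.strip()]
-- ===== Notes on version B (the rewrite author's own statement) =====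
-- stated objective: alternative
-- what changed: A interleaves stripping, header detection and flushing of an open accumulator inside one loop; B first cleans the lines (strip and drop blanks), then cuts the cleaned list into segments at header lines with an index scan, and finally joins each segment.
import Mathlib
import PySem

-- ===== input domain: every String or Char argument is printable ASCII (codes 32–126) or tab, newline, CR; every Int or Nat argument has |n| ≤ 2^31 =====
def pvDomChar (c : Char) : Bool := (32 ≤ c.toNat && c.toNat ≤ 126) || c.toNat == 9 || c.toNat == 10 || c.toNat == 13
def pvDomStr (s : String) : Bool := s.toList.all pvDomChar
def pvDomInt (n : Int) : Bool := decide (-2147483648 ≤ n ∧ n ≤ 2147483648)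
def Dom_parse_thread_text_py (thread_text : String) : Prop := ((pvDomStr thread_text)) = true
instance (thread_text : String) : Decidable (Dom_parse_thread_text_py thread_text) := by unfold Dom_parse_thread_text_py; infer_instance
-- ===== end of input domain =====

-- B re-implements A with a different decomposition (clean lines first, then cut into
-- segments at header lines, then join); same cost, no speed claim; A=B everywhere.

-- Header test `s and s[0].isdigit() and "/" in s[:4]` (the [] case covers Python's
-- short-circuit on an empty string); used by both ports.
def pvIsHeader (s : List Char) : Bool :=
  match s with
  | [] => false
  | c :: _ => PySem.Chars.isdigit c && PySem.Chars.isIn ['/'] (PySem.Chars.slice s none (some 4))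

-- ===== PORT A =====
-- loop body of A's `for line in ...`, state = (tweets, current)
def pvStepA (st : List (List Char) × List (List Char)) (line : List Char) :
    List (List Char) × List (List Char) :=
  let stripped := PySem.Chars.strip line
  if pvIsHeader stripped then
    ((if st.2 ≠ [] then st.1 ++ [PySem.Chars.strip (PySem.Chars.join ['\n'] st.2)] else st.1),
     [stripped])
  else if stripped ≠ [] then (st.1, st.2 ++ [stripped])
  else st

def parse_thread_text_py (thread_text : String) : List String :=
  let st := (PySem.Chars.splitOn (PySem.Chars.strip thread_text.toList) ['\n']).foldl
      pvStepA ([], [])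
  let tweets :=
    if st.2 ≠ [] then st.1 ++ [PySem.Chars.strip (PySem.Chars.join ['\n'] st.2)] else st.1
  if tweets ≠ [] then tweets.map String.ofList
  else [String.ofList (PySem.Chars.strip thread_text.toList)]

-- ===== PORT B =====
-- B's segment scan: each segment is one line plus the following non-header lines
-- (the inner `while j < len(lines) and not is_header(lines[j])` is the takeWhile/dropWhile).
def pvSegments (ls : List (List Char)) : List (List (List Char)) :=
  match ls with
  | [] => []
  | x :: rest =>
      (x :: rest.takeWhile (fun s => !pvIsHeader s)) ::
        pvSegments (rest.dropWhile (fun s => !pvIsHeader s))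
termination_by ls.length
decreasing_by
  have := List.length_dropWhile_le (fun s => !pvIsHeader s) rest
  simp; omega

def parse_thread_text_py_alt (thread_text : String) : List String :=
  let lines := ((PySem.Chars.splitOn (PySem.Chars.strip thread_text.toList) ['\n']).filter
      (fun l => PySem.Chars.strip l ≠ [])).map PySem.Chars.strip
  let tweets := (pvSegments lines).map (fun g => PySem.Chars.strip (PySem.Chars.join ['\n'] g))
  if tweets ≠ [] then tweets.map String.ofList
  else [String.ofList (PySem.Chars.strip thread_text.toList)]

-- ===== PRECONDITION & SPEC =====
def Spec_parse_thread_text_py (thread_text : String) (out : List String) : Prop := out = parse_thread_text_py_alt thread_text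
instance (thread_text : String) (out : List String) : Decidable (Spec_parse_thread_text_py thread_text out) := by unfold Spec_parse_thread_text_py; infer_instance

-- ===== CLAIM (what is proved, stated in full; the proofs are below) =====
def Claim_equal_parse_thread_text_py : Prop := ∀ (thread_text : String), Dom_parse_thread_text_py thread_text → Spec_parse_thread_text_py thread_text (parse_thread_text_py thread_text)

-- ===== LEMMAS AND PROOFS =====

-- proof-only helpers
def pvF (g : List (List Char)) : List Char := PySem.Chars.strip (PySem.Chars.join ['\n'] g)

def pvStep (st : List (List Char) × List (List Char)) (s : List Char) :
    List (List Char) × List (List Char) :=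
  if pvIsHeader s then ((if st.2 ≠ [] then st.1 ++ [pvF st.2] else st.1), [s])
  else (st.1, st.2 ++ [s])

def pvFin (st : List (List Char) × List (List Char)) : List (List Char) :=
  if st.2 ≠ [] then st.1 ++ [pvF st.2] else st.1

-- A's "finished tweets" of the remaining lines, given the open group `cur`
def pvFG (cur : List (List Char)) : List (List Char) → List (List Char)
  | [] => if cur ≠ [] then [pvF cur] else []
  | x :: ls =>
      if pvIsHeader x then (if cur ≠ [] then [pvF cur] else []) ++ pvFG [x] ls
      else pvFG (cur ++ [x]) ls

theorem pvFin_eq (st : List (List Char) × List (List Char)) :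
    (if st.2 ≠ [] then st.1 ++ [PySem.Chars.strip (PySem.Chars.join ['\n'] st.2)] else st.1)
      = pvFin st := rfl

-- the raw loop over split lines = the clean loop over stripped non-blank lines
theorem pvFoldA_eq (raw : List (List Char)) (init : List (List Char) × List (List Char)) :
    raw.foldl pvStepA init
      = ((raw.filter (fun l => PySem.Chars.strip l ≠ [])).map PySem.Chars.strip).foldl pvStep init := by
  induction raw generalizing init with
  | nil => rfl
  | cons x xs ih =>
      by_cases h : PySem.Chars.strip x = []
      · have hstep : pvStepA init x = init := by
          simp [pvStepA, h, pvIsHeader]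
        simp [List.foldl_cons, hstep, h, ih]
      · have hstep : pvStepA init x = pvStep init (PySem.Chars.strip x) := by
          simp [pvStepA, pvStep, pvF, h]
        simp [List.foldl_cons, hstep, h, ih]

theorem pvFin_foldl (ls : List (List Char)) (tw cur : List (List Char)) :
    pvFin (ls.foldl pvStep (tw, cur)) = tw ++ pvFG cur ls := by
  induction ls generalizing tw cur with
  | nil =>
      by_cases h : cur = [] <;> simp [pvFin, pvFG, h]
  | cons x xs ih =>
      by_cases hx : pvIsHeader x
      · have hstep : pvStep (tw, cur) x = (pvFin (tw, cur), [x]) := by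
          simp [pvStep, pvFin, hx]
        rw [List.foldl_cons, hstep, ih, pvFG]
        simp only [hx, if_true]
        by_cases h : cur = [] <;> simp [pvFin, h, List.append_assoc]
      · have hstep : pvStep (tw, cur) x = (tw, cur ++ [x]) := by
          simp [pvStep, hx]
        simp [List.foldl_cons, hstep, ih, pvFG, hx]

theorem pvFG_segments (ls : List (List Char)) (cur : List (List Char)) (h : cur ≠ []) :
    pvFG cur ls
      = pvF (cur ++ ls.takeWhile (fun s => !pvIsHeader s)) ::
          (pvSegments (ls.dropWhile (fun s => !pvIsHeader s))).map pvF := by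
  induction ls generalizing cur with
  | nil => simp [pvFG, h, pvSegments]
  | cons x xs ih =>
      by_cases hx : pvIsHeader x
      · rw [pvFG]
        simp only [hx, if_pos, h, ne_eq, not_false_iff]
        rw [ih [x] (by simp)]
        simp [List.dropWhile_cons, hx, pvSegments]
      · rw [pvFG]
        simp only [hx, if_neg, Bool.false_eq_true, not_false_iff]
        rw [ih (cur ++ [x]) (by simp)]
        simp [List.dropWhile_cons, hx, List.append_assoc]

theorem pvFin_segments (ls : List (List Char)) :
    pvFin (ls.foldl pvStep ([], [])) = (pvSegments ls).map pvF := by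
  cases ls with
  | nil => simp [pvFin, pvSegments]
  | cons x xs =>
      rw [pvFin_foldl]
      have hfg : pvFG [] (x :: xs) = pvFG [x] xs := by
        by_cases hx : pvIsHeader x <;> simp [pvFG, hx]
      rw [List.nil_append, hfg, pvFG_segments xs [x] (by simp), pvSegments]
      simp

theorem parse_thread_text_py_eq (t : String) :
    parse_thread_text_py t = parse_thread_text_py_alt t := by
  simp only [parse_thread_text_py, parse_thread_text_py_alt]
  rw [pvFoldA_eq, pvFin_eq, pvFin_segments]
  simp [Function.comp_def, pvF]

-- ===== VERDICT (by name: the statement is the Claim_ definition above) =====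
theorem parse_thread_text_py_spec : Claim_equal_parse_thread_text_py := by
  intro t _
  exact parse_thread_text_py_eq t
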